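-- pv_equiv track=rewrite | github.com/XyzHuy/-DL-Fine-tuning-coding-model | data/solution/Solution2019.py | scoreOfStudents
-- ===== SOURCE A (Python) =====
-- from typing import List
-- from functools import lru_cache
--
-- def scoreOfStudents(s: str, answers: List[int]) -> int:
--     def calculate_correct_answer(s):
--         stack = []
--         current_number = 0
--         current_operator = '+'
--
--         for i, char in enumerate(s):
--             if char.isdigit():
--                 current_number = current_number * 10 + int(char)
--
--             if not char.isdigit() or i == len(s) - 1:
--                 if current_operator == '+':
--                     stack.append(current_number)
--                 elif current_operator == '*':
--                     stack[-1] *= current_number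
--                 current_operator = char
--                 current_number = 0
--
--         return sum(stack)
--
--     @lru_cache(None)
--     def get_possible_answers(sub_expr):
--         if sub_expr.isdigit():
--             return {int(sub_expr)}
--
--         possible_results = set()
--         for i, char in enumerate(sub_expr):
--             if char in "+*":
--                 left_results = get_possible_answers(sub_expr[:i])
--                 right_results = get_possible_answers(sub_expr[i+1:])
--
--                 for left in left_results:
--                     for right in right_results:
--                         result = left + right if char == '+' else left * right
--                         if result <= 1000:  # Since answers are bounded by 1000
--                             possible_results.add(result)
--         return possible_results
--
--     correct_answer = calculate_correct_answer(s)
--     possible_answers = get_possible_answers(s)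
--
--     score = 0
--     for answer in answers:
--         if answer == correct_answer:
--             score += 5
--         elif answer in possible_answers:
--             score += 2
--
--     return score
-- ===== SOURCE B (Python) =====
-- from typing import List
--
-- def scoreOfStudents(s: str, answers: List[int]) -> int:
--     # correct answer: single left-to-right scan (same as original)
--     stack = []
--     current_number = 0
--     current_operator = '+'
--     for i, char in enumerate(s):
--         if char.isdigit():
--             current_number = current_number * 10 + int(char)
--         if not char.isdigit() or i == len(s) - 1:
--             if current_operator == '+':
--                 stack.append(current_number)
--             elif current_operator == '*':
--                 stack[-1] *= current_number
--             current_operator = char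
--             current_number = 0
--     correct = sum(stack)
--
--     # possible answers: bottom-up interval DP over operator-separated segments
--     n = len(s)
--     ops = [k for k in range(n) if s[k] in "+*"]
--     m = len(ops)
--     bounds = [0] + [k + 1 for k in ops]   # left char boundary of segment a
--     ends = ops + [n]                      # right char boundary of segment a
--     dp = {}
--     for span in range(0, m + 1):
--         for a in range(0, m + 1 - span):
--             b = a + span
--             if span == 0:
--                 seg = s[bounds[a]:ends[a]]
--                 dp[(a, a)] = {int(seg)} if seg.isdigit() else set()
--             else:
--                 acc = set()
--                 for t in range(a, b):
--                     for x in dp[(a, t)]: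
--                         for y in dp[(t + 1, b)]:
--                             r = x + y if s[ops[t]] == '+' else x * y
--                             if r <= 1000:
--                                 acc.add(r)
--                 dp[(a, b)] = acc
--     possible = dp[(0, m)]
--
--     return 5 * answers.count(correct) + 2 * sum(
--         1 for x in answers if x != correct and x in possible)
-- ===== Notes on version B (the rewrite author's own statement) =====
-- stated objective: alternative
-- what changed: The set of possible answers is computed by an iterative bottom-up interval-DP table dp[(a,b)] over operator-separated segments (filled by increasing span) instead of A's memoized top-down recursion over substring slices, and the scoring loop is replaced by 5*count + 2*countP arithmetic; the correct-answer scan is reused unchanged.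
import Mathlib
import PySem

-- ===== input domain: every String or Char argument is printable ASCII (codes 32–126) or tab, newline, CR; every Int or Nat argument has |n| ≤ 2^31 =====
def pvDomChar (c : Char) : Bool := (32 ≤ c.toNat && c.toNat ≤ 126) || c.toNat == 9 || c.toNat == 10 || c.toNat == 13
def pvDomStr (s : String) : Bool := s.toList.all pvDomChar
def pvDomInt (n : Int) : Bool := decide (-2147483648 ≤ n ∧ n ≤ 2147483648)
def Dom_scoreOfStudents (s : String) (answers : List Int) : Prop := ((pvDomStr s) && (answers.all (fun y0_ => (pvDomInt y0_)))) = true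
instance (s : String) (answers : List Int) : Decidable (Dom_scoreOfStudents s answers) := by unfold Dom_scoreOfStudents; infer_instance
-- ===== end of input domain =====

-- B replaces A's memoized top-down recursion over substring slices by a bottom-up interval-DP
-- table over operator-separated segments, and the scoring loop by count/countP arithmetic;
-- the correct-answer scan of Source A is reused unchanged by Source B (objective: alternative).

-- ===== PORT A =====

-- char is '+' or '*'  (Python: char in "+*")
def pvIsOp (c : Char) : Bool := c == '+' || c == '*'

-- the inner double loop: 'for x in L: for y in R: r = x+y / x*y; if r <= 1000: acc.add(r)'
-- (this loop is textually identical in Source A and Source B, hence shared; 'acc' is a Python set,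
-- kept in first-insertion order)
def pvComb (c : Char) (L R acc : List Int) : List Int :=
  L.foldl (fun a x =>
    R.foldl (fun a y =>
      let r := if c == '+' then x + y else x * y
      if r ≤ 1000 then PySem.Set.add a r else a) a) acc

-- calculate_correct_answer: single scan (textually identical in Source A and Source B, hence shared).
-- The Python stack appends at the END and mutates stack[-1]; here the stack is kept
-- top-first (cons / head-mutation), the same multiset, and only its sum is used.
-- The '| [] => []' arm is unreachable (a '*' operator state is only ever reached after a
-- first push under the initial '+').  int(char) on a digit char is c.toNat - 48.
def pvCorrect (l : List Char) : Int :=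
  let res := (List.range l.length).foldl
    (fun (st : List Int × Int × Char) i =>
      let c := l.getD i ' '
      let num := if PySem.Chars.isdigit c then st.2.1 * 10 + ((c.toNat : Int) - 48) else st.2.1
      if !PySem.Chars.isdigit c || i == l.length - 1 then
        let stack :=
          if st.2.2 == '+' then num :: st.1
          else if st.2.2 == '*' then
            (match st.1 with | [] => [] | x :: r => (x * num) :: r)
          else st.1
        (stack, 0, c)
      else (st.1, num, st.2.2))
    ([], 0, '+')
  res.1.sum

-- get_possible_answers: recursion over the substring (the lru_cache only memoizes: same values).
-- 'for i, char in enumerate(sub)' becomes a fold over the index range; sub[:i] / sub[i+1:]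
-- are take / drop (nonnegative slice bounds); int(sub) on an all-digit sub is ofChars?.
def pvPossA (l : List Char) : List Int :=
  if PySem.Chars.strIsdigit l then [(PySem.Int.ofChars? l).getD 0]
  else
    (List.range l.length).attach.foldl
      (fun acc i =>
        let c := l.getD i.1 ' '
        if pvIsOp c then
          pvComb c (pvPossA (l.take i.1)) (pvPossA (l.drop (i.1 + 1))) acc
        else acc) []
termination_by l.length
decreasing_by
  · have : i.1 < l.length := List.mem_range.mp i.2
    simp [List.length_take]; omega
  · have : i.1 < l.length := List.mem_range.mp i.2
    simp [List.length_drop]; omega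

def scoreOfStudents (s : String) (answers : List Int) : Int :=
  let l := s.toList
  let correct := pvCorrect l
  let possible := pvPossA l
  answers.foldl
    (fun score answer =>
      if answer = correct then score + 5
      else if answer ∈ possible then score + 2
      else score) 0

-- ===== PORT B =====

-- ops = [k for k in range(n) if s[k] in "+*"]
def pvOps (l : List Char) : List Nat :=
  (List.range l.length).filter (fun k => pvIsOp (l.getD k ' '))

-- span-0 cell body: seg = s[bounds[a]:ends[a]]; {int(seg)} if seg.isdigit() else set()
def pvCellBase (l : List Char) (a : Nat) : List Int :=
  let bounds := 0 :: (pvOps l).map (· + 1)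
  let ends := pvOps l ++ [l.length]
  let seg := (l.drop (bounds.getD a 0)).take (ends.getD a 0 - bounds.getD a 0)
  if PySem.Chars.strIsdigit seg then [(PySem.Int.ofChars? seg).getD 0] else []

-- span>0 cell body: combine dp[(a,t)] and dp[(t+1,b)] over the operator s[ops[t]]
-- (both cells are always present in the Python dict; the [] default is never used)
def pvCellStep (l : List Char) (dp : PySem.Dict (Nat × Nat) (List Int)) (a span : Nat) :
    List Int :=
  (List.range' a span).foldl
    (fun acc t =>
      pvComb (l.getD ((pvOps l).getD t 0) ' ')
        (dp.getD (a, t) []) (dp.getD (t + 1, a + span) []) acc) []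

-- the inner 'for a in range(0, m + 1 - span)' loop
def pvInner (l : List Char) (span : Nat) (dp : PySem.Dict (Nat × Nat) (List Int)) :
    PySem.Dict (Nat × Nat) (List Int) :=
  (List.range ((pvOps l).length + 1 - span)).foldl
    (fun dp a =>
      if span = 0 then dp.insert (a, a) (pvCellBase l a)
      else dp.insert (a, a + span) (pvCellStep l dp a span))
    dp

-- bottom-up interval DP over operator-separated segments, by increasing span
def pvPossAlt (l : List Char) : List Int :=
  let m := (pvOps l).length
  let dp := (List.range (m + 1)).foldl (fun dp span => pvInner l span dp) PySem.Dict.empty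
  dp.getD (0, m) []

def scoreOfStudents_alt (s : String) (answers : List Int) : Int :=
  let l := s.toList
  let correct := pvCorrect l
  let possible := pvPossAlt l
  5 * (answers.count correct : Int)
    + 2 * ((answers.countP (fun x => decide (x ≠ correct) && decide (x ∈ possible))) : Int)

-- ===== PRECONDITION & SPEC =====
def Spec_scoreOfStudents (s : String) (answers : List Int) (out : Int) : Prop := out = scoreOfStudents_alt s answers
instance (s : String) (answers : List Int) (out : Int) : Decidable (Spec_scoreOfStudents s answers out) := by unfold Spec_scoreOfStudents; infer_instance

-- ===== CLAIM (what is proved, stated in full; the proofs are below) =====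
def Claim_equal_scoreOfStudents : Prop := ∀ (s : String) (answers : List Int), Dom_scoreOfStudents s answers → Spec_scoreOfStudents s answers (scoreOfStudents s answers)

-- ===== LEMMAS AND PROOFS =====

-- left char boundary of segment a / right char boundary of segment b
def pvLb (l : List Char) (a : Nat) : Nat :=
  if a = 0 then 0 else (pvOps l).getD (a - 1) 0 + 1
def pvRe (l : List Char) (b : Nat) : Nat :=
  if b = (pvOps l).length then l.length else (pvOps l).getD b 0
-- the substring made of segments a..b (with the operators between them)
def pvSeg (l : List Char) (a b : Nat) : List Char :=
  (l.drop (pvLb l a)).take (pvRe l b - pvLb l a)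

lemma pvOps_pairwise (l : List Char) : (pvOps l).Pairwise (· < ·) :=
  List.pairwise_lt_range.filter _

lemma mem_pvOps (l : List Char) (k : Nat) :
    k ∈ pvOps l ↔ k < l.length ∧ pvIsOp (l.getD k ' ') = true := by
  simp [pvOps, List.mem_filter, List.mem_range]

lemma pvOps_getD_lt (l : List Char) {t : Nat} (ht : t < (pvOps l).length) :
    (pvOps l).getD t 0 < l.length := by
  rw [List.getD_eq_getElem _ _ ht]
  exact ((mem_pvOps l _).mp (List.getElem_mem ht)).1

lemma pvOps_getD_isOp (l : List Char) {t : Nat} (ht : t < (pvOps l).length) :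
    pvIsOp (l.getD ((pvOps l).getD t 0) ' ') = true := by
  rw [List.getD_eq_getElem _ _ ht]
  exact ((mem_pvOps l _).mp (List.getElem_mem ht)).2

lemma pvOps_strictMono (l : List Char) {t t' : Nat} (h : t < t')
    (ht' : t' < (pvOps l).length) : (pvOps l).getD t 0 < (pvOps l).getD t' 0 := by
  rw [List.getD_eq_getElem _ _ (lt_trans h ht'), List.getD_eq_getElem _ _ ht']
  exact List.pairwise_iff_getElem.mp (pvOps_pairwise l) _ _ _ _ h

lemma pvOps_mono (l : List Char) {t t' : Nat} (h : t ≤ t')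
    (ht' : t' < (pvOps l).length) : (pvOps l).getD t 0 ≤ (pvOps l).getD t' 0 := by
  rcases Nat.lt_or_ge t t' with h' | h'
  · exact le_of_lt (pvOps_strictMono l h' ht')
  · have : t = t' := le_antisymm h h'
    simp [this]

lemma pvRe_le (l : List Char) {b : Nat} (hbm : b ≤ (pvOps l).length) :
    pvRe l b ≤ l.length := by
  unfold pvRe; split
  · exact le_refl _
  · exact le_of_lt (pvOps_getD_lt l (lt_of_le_of_ne hbm (by assumption)))

-- the op between segments t and t+1 lies inside the window of segments a..b (a ≤ t < b)
lemma pvOpt_bounds (l : List Char) {a t b : Nat} (hat : a ≤ t) (htb : t < b)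
    (hbm : b ≤ (pvOps l).length) :
    pvLb l a ≤ (pvOps l).getD t 0 ∧ (pvOps l).getD t 0 < pvRe l b := by
  have htm : t < (pvOps l).length := lt_of_lt_of_le htb hbm
  constructor
  · unfold pvLb
    by_cases ha : a = 0
    · simp [ha]
    · simp only [ha, if_false]
      have := pvOps_strictMono l (t := a - 1) (t' := t) (by omega) htm
      omega
  · unfold pvRe
    by_cases hb : b = (pvOps l).length
    · simp only [hb, if_pos]
      exact pvOps_getD_lt l htm
    · simp only [hb, if_false]
      exact pvOps_strictMono l htb (by omega)

-- window characterization: the op positions inside [pvLb a, pvRe b) are exactly ops[t], a ≤ t < b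
lemma pvWindow (l : List Char) {a b : Nat} (hab : a ≤ b) (hbm : b ≤ (pvOps l).length)
    (k : Nat) :
    (pvLb l a ≤ k ∧ k < pvRe l b ∧ pvIsOp (l.getD k ' ') = true) ↔
      ∃ t, a ≤ t ∧ t < b ∧ (pvOps l).getD t 0 = k := by
  constructor
  · rintro ⟨hlb, hre, hop⟩
    have hkn : k < l.length := lt_of_lt_of_le hre (pvRe_le l hbm)
    have hk : k ∈ pvOps l := (mem_pvOps l k).mpr ⟨hkn, hop⟩
    obtain ⟨t, htm, hget⟩ := List.mem_iff_getElem.mp hk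
    rw [← List.getD_eq_getElem _ 0 htm] at hget
    refine ⟨t, ?_, ?_, hget⟩
    · by_contra hta
      have hta' : t < a := by omega
      have ha0 : a ≠ 0 := by omega
      have hle := pvOps_mono l (t := t) (t' := a - 1) (by omega) (by omega)
      unfold pvLb at hlb
      simp only [ha0, if_false] at hlb
      omega
    · by_contra htb
      have htb' : b ≤ t := by omega
      by_cases hb : b = (pvOps l).length
      · omega
      · have hle := pvOps_mono l (t := b) (t' := t) htb' htm
        unfold pvRe at hre
        simp only [hb, if_false] at hre
        omega
  · rintro ⟨t, hat, htb, rfl⟩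
    obtain ⟨h1, h2⟩ := pvOpt_bounds l hat htb hbm
    exact ⟨h1, h2, pvOps_getD_isOp l (lt_of_lt_of_le htb hbm)⟩

lemma pvSeg_length (l : List Char) {a b : Nat} (_hab : a ≤ b) (hbm : b ≤ (pvOps l).length) :
    (pvSeg l a b).length = pvRe l b - pvLb l a := by
  have := pvRe_le l hbm
  simp [pvSeg, List.length_take, List.length_drop]; omega

lemma pvSeg_getD (l : List Char) {a b i : Nat} (hab : a ≤ b) (hbm : b ≤ (pvOps l).length)
    (hi : i < pvRe l b - pvLb l a) :
    (pvSeg l a b).getD i ' ' = l.getD (pvLb l a + i) ' ' := by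
  have hre := pvRe_le l hbm
  have hlen := pvSeg_length l hab hbm
  rw [List.getD_eq_getElem _ ' ' (by omega), List.getD_eq_getElem _ ' ' (by omega)]
  simp only [pvSeg, List.getElem_take, List.getElem_drop]

lemma pvSeg_take (l : List Char) {a t b : Nat} (hat : a ≤ t) (htb : t < b)
    (hbm : b ≤ (pvOps l).length) :
    (pvSeg l a b).take ((pvOps l).getD t 0 - pvLb l a) = pvSeg l a t := by
  obtain ⟨h1, h2⟩ := pvOpt_bounds l hat htb hbm
  have htm : t < (pvOps l).length := lt_of_lt_of_le htb hbm
  unfold pvSeg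
  rw [List.take_take]
  congr 1
  have hret : pvRe l t = (pvOps l).getD t 0 := by
    unfold pvRe; simp only [Nat.ne_of_lt htm, if_false]
  omega

lemma pvSeg_drop (l : List Char) {a t b : Nat} (hat : a ≤ t) (htb : t < b)
    (hbm : b ≤ (pvOps l).length) :
    (pvSeg l a b).drop ((pvOps l).getD t 0 - pvLb l a + 1) = pvSeg l (t + 1) b := by
  obtain ⟨h1, h2⟩ := pvOpt_bounds l hat htb hbm
  have htm : t < (pvOps l).length := lt_of_lt_of_le htb hbm
  unfold pvSeg
  rw [List.drop_take, List.drop_drop]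
  have hlb : pvLb l (t + 1) = (pvOps l).getD t 0 + 1 := by
    unfold pvLb; simp
  rw [hlb]
  have e1 : pvRe l b - pvLb l a - ((pvOps l).getD t 0 - pvLb l a + 1)
      = pvRe l b - ((pvOps l).getD t 0 + 1) := by omega
  have e2 : pvLb l a + ((pvOps l).getD t 0 - pvLb l a + 1) = (pvOps l).getD t 0 + 1 := by
    omega
  rw [e1, e2]

lemma pvSeg_full (l : List Char) : pvSeg l 0 (pvOps l).length = l := by
  simp [pvSeg, pvLb, pvRe]

-- characterization of pvPossA without the attach
lemma pvPossA_eq (l : List Char) :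
    pvPossA l =
      if PySem.Chars.strIsdigit l then [(PySem.Int.ofChars? l).getD 0]
      else
        (List.range l.length).foldl
          (fun acc i =>
            if pvIsOp (l.getD i ' ') then
              pvComb (l.getD i ' ') (pvPossA (l.take i)) (pvPossA (l.drop (i + 1))) acc
            else acc) [] := by
  rw [pvPossA]
  by_cases hd : PySem.Chars.strIsdigit l
  · simp [hd]
  · simp only [hd, Bool.false_eq_true, if_false]
    exact List.foldl_attach
      (f := fun acc i =>
        if pvIsOp (l.getD i ' ') = true then
          pvComb (l.getD i ' ') (pvPossA (l.take i)) (pvPossA (l.drop (i + 1))) acc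
        else acc)
      (l := List.range l.length) (b := [])

-- the op positions of a segment-aligned window, as relative indices
lemma pvFilter_align (l : List Char) {a b : Nat} (hab : a ≤ b)
    (hbm : b ≤ (pvOps l).length) :
    (List.range (pvSeg l a b).length).filter
        (fun i => pvIsOp ((pvSeg l a b).getD i ' ')) =
      (List.range' a (b - a)).map (fun t => (pvOps l).getD t 0 - pvLb l a) := by
  have hlen := pvSeg_length l hab hbm
  have hp1 : (List.filter (fun i => pvIsOp ((pvSeg l a b).getD i ' '))
      (List.range (pvSeg l a b).length)).Pairwise (· < ·) :=
    List.pairwise_lt_range.filter _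
  have hp2 : ((List.range' a (b - a)).map
      (fun t => (pvOps l).getD t 0 - pvLb l a)).Pairwise (· < ·) := by
    rw [List.pairwise_iff_getElem]
    intro u v hu hv huv
    simp only [List.getElem_map, List.getElem_range'] at *
    simp only [List.length_map, List.length_range'] at hu hv
    have h1 := pvOpt_bounds l (a := a) (t := a + u) (b := b) (by omega) (by omega) hbm
    have h2 := pvOpt_bounds l (a := a) (t := a + v) (b := b) (by omega) (by omega) hbm
    have h3 := pvOps_strictMono l (t := a + 1 * u) (t' := a + 1 * v) (by omega)
      (by omega)
    have h4 := h1.1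
    simp only [one_mul] at *
    omega
  have hmem : ∀ x, x ∈ List.filter (fun i => pvIsOp ((pvSeg l a b).getD i ' '))
        (List.range (pvSeg l a b).length) ↔
      x ∈ (List.range' a (b - a)).map (fun t => (pvOps l).getD t 0 - pvLb l a) := by
    intro x
    rw [List.mem_filter, List.mem_range, List.mem_map]
    constructor
    · rintro ⟨hx, hop⟩
      rw [hlen] at hx
      rw [pvSeg_getD l hab hbm hx] at hop
      have hw := (pvWindow l hab hbm (pvLb l a + x)).mp ⟨by omega, by omega, hop⟩
      obtain ⟨t, hat, htb, hget⟩ := hw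
      refine ⟨t, ?_, by omega⟩
      rw [List.mem_range']
      exact ⟨t - a, by omega, by omega⟩
    · rintro ⟨t, htmem, hfx⟩
      rw [List.mem_range'] at htmem
      obtain ⟨i, hi, rfl⟩ := htmem
      have hat : a ≤ a + 1 * i := by omega
      have htb : a + 1 * i < b := by omega
      obtain ⟨hl1, hl2⟩ := pvOpt_bounds l hat htb hbm
      have hx : x < pvRe l b - pvLb l a := by omega
      constructor
      · omega
      · rw [pvSeg_getD l hab hbm hx]
        have : pvLb l a + x = (pvOps l).getD (a + 1 * i) 0 := by omega
        rw [this]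
        exact pvOps_getD_isOp l (lt_of_lt_of_le htb hbm)
  exact List.Perm.eq_of_pairwise
    (fun x y _ _ h1 h2 => by omega) hp1 hp2
    ((List.perm_ext_iff_of_nodup (hp1.imp Nat.ne_of_lt) (hp2.imp Nat.ne_of_lt)).mpr hmem)

lemma pvIsOp_not_digit {c : Char} (h : pvIsOp c = true) :
    PySem.Chars.isdigit c = false := by
  simp only [pvIsOp, Bool.or_eq_true, beq_iff_eq] at h
  rcases h with h | h <;> subst h <;> decide

-- span-0 cells: an operator-free window
lemma pvPossA_seg_base (l : List Char) {a : Nat} (ham : a ≤ (pvOps l).length) :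
    pvPossA (pvSeg l a a) =
      (if PySem.Chars.strIsdigit (pvSeg l a a)
       then [(PySem.Int.ofChars? (pvSeg l a a)).getD 0] else []) := by
  rw [pvPossA_eq]
  by_cases hd : PySem.Chars.strIsdigit (pvSeg l a a)
  · simp [hd]
  · simp only [hd, Bool.false_eq_true, if_false]
    rw [PySem.List.foldl_if_eq_foldl_filter
      (p := fun i => pvIsOp ((pvSeg l a a).getD i ' '))
      (f := fun acc i =>
        pvComb ((pvSeg l a a).getD i ' ') (pvPossA ((pvSeg l a a).take i))
          (pvPossA ((pvSeg l a a).drop (i + 1))) acc)]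
    rw [pvFilter_align l (le_refl a) ham]
    simp

-- span>0 cells: A's recursion on a window splits exactly at the ops of the window
lemma pvPossA_seg_step (l : List Char) {a b : Nat} (hab : a < b)
    (hbm : b ≤ (pvOps l).length) :
    pvPossA (pvSeg l a b) =
      (List.range' a (b - a)).foldl
        (fun acc t =>
          pvComb (l.getD ((pvOps l).getD t 0) ' ')
            (pvPossA (pvSeg l a t)) (pvPossA (pvSeg l (t + 1) b)) acc) [] := by
  have hab' : a ≤ b := le_of_lt hab
  have hlen := pvSeg_length l hab' hbm
  obtain ⟨h1, h2⟩ := pvOpt_bounds l (le_refl a) hab hbm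
  have hx : (pvOps l).getD a 0 - pvLb l a < pvRe l b - pvLb l a := by omega
  have hdig : PySem.Chars.strIsdigit (pvSeg l a b) = false := by
    have hgd := pvSeg_getD l hab' hbm hx
    have heq : pvLb l a + ((pvOps l).getD a 0 - pvLb l a) = (pvOps l).getD a 0 := by omega
    rw [heq] at hgd
    have hnotd : PySem.Chars.isdigit
        ((pvSeg l a b).getD ((pvOps l).getD a 0 - pvLb l a) ' ') = false := by
      rw [hgd]
      exact pvIsOp_not_digit (pvOps_getD_isOp l (lt_of_lt_of_le hab hbm))
    rw [List.getD_eq_getElem _ ' ' (by omega)] at hnotd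
    simp only [PySem.Chars.strIsdigit, Bool.and_eq_false_iff]
    right
    rw [List.all_eq_false]
    refine ⟨(pvSeg l a b)[(pvOps l).getD a 0 - pvLb l a]'(by omega),
      List.getElem_mem _, ?_⟩
    simpa using hnotd
  rw [pvPossA_eq]
  simp only [hdig, Bool.false_eq_true, if_false]
  rw [PySem.List.foldl_if_eq_foldl_filter
    (p := fun i => pvIsOp ((pvSeg l a b).getD i ' '))
    (f := fun acc i =>
      pvComb ((pvSeg l a b).getD i ' ') (pvPossA ((pvSeg l a b).take i))
        (pvPossA ((pvSeg l a b).drop (i + 1))) acc)]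
  rw [pvFilter_align l hab' hbm, List.foldl_map]
  apply PySem.List.foldl_congr_mem
  intro acc t ht
  rw [List.mem_range'] at ht
  obtain ⟨i, hi, rfl⟩ := ht
  have hat : a ≤ a + 1 * i := by omega
  have htb : a + 1 * i < b := by omega
  obtain ⟨g1, g2⟩ := pvOpt_bounds l hat htb hbm
  have hx' : (pvOps l).getD (a + 1 * i) 0 - pvLb l a < pvRe l b - pvLb l a := by omega
  have hgd := pvSeg_getD l hab' hbm hx'
  have heq : pvLb l a + ((pvOps l).getD (a + 1 * i) 0 - pvLb l a)
      = (pvOps l).getD (a + 1 * i) 0 := by omega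
  rw [heq] at hgd
  rw [hgd, pvSeg_take l hat htb hbm, pvSeg_drop l hat htb hbm]

lemma pvCellBase_correct (l : List Char) {a : Nat} (ham : a ≤ (pvOps l).length) :
    pvCellBase l a = pvPossA (pvSeg l a a) := by
  have hb : (0 :: (pvOps l).map (· + 1)).getD a 0 = pvLb l a := by
    cases a with
    | zero => simp [pvLb]
    | succ j =>
      have hj : j < (pvOps l).length := by omega
      simp only [List.getD_cons_succ]
      rw [List.getD_eq_getElem _ 0 (by simpa using hj), List.getElem_map]
      unfold pvLb
      rw [List.getD_eq_getElem _ 0 (by simpa using hj)]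
      simp
  have he : ((pvOps l) ++ [l.length]).getD a 0 = pvRe l a := by
    by_cases ha : a = (pvOps l).length
    · subst ha
      rw [List.getD_eq_getElem _ 0 (by simp)]
      rw [List.getElem_append_right (le_refl _)]
      simp [pvRe]
    · have ha' : a < (pvOps l).length := by omega
      rw [List.getD_eq_getElem _ 0 (by simp; omega)]
      rw [List.getElem_append_left ha']
      unfold pvRe
      rw [List.getD_eq_getElem _ 0 ha']
      simp [ha]
  rw [pvPossA_seg_base l ham]
  simp only [pvCellBase, pvSeg]
  rw [hb, he]

lemma pvCellStep_correct (l : List Char) (dp : PySem.Dict (Nat × Nat) (List Int))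
    {a σ : Nat} (hσ : 0 < σ) (ham : a + σ ≤ (pvOps l).length)
    (Hlow : ∀ a' b' : Nat, a' ≤ b' → b' ≤ (pvOps l).length → b' - a' < σ →
      dp.getD (a', b') [] = pvPossA (pvSeg l a' b')) :
    pvCellStep l dp a σ = pvPossA (pvSeg l a (a + σ)) := by
  rw [pvPossA_seg_step l (by omega) ham]
  unfold pvCellStep
  have hss : a + σ - a = σ := by omega
  rw [hss]
  apply PySem.List.foldl_congr_mem
  intro acc t ht
  rw [List.mem_range'] at ht
  obtain ⟨i, hi, rfl⟩ := ht
  rw [Hlow a (a + 1 * i) (by omega) (by omega) (by omega)]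
  rw [Hlow (a + 1 * i + 1) (a + σ) (by omega) (by omega) (by omega)]

lemma pvInner_fold (l : List Char) (σ : Nat) (as : List Nat) :
    ∀ (dp : PySem.Dict (Nat × Nat) (List Int)),
    (∀ a ∈ as, a + σ ≤ (pvOps l).length) →
    (∀ a' b' : Nat, a' ≤ b' → b' ≤ (pvOps l).length → b' - a' < σ →
      dp.getD (a', b') [] = pvPossA (pvSeg l a' b')) →
    ∀ a b : Nat, a ≤ b → b ≤ (pvOps l).length →
    (b - a < σ ∨ (b - a = σ ∧ (a ∈ as ∨ dp.getD (a, b) [] = pvPossA (pvSeg l a b)))) →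
    (as.foldl
        (fun dp a =>
          if σ = 0 then dp.insert (a, a) (pvCellBase l a)
          else dp.insert (a, a + σ) (pvCellStep l dp a σ))
        dp).getD (a, b) [] = pvPossA (pvSeg l a b) := by
  induction as with
  | nil =>
    intro dp _ Hlow a b hab hbm htar
    simp only [List.foldl_nil]
    rcases htar with h | ⟨_, h | h⟩
    · exact Hlow a b hab hbm h
    · cases h
    · exact h
  | cons a' as' ih =>
    intro dp has Hlow a b hab hbm htar
    simp only [List.foldl_cons]
    have ham' : a' + σ ≤ (pvOps l).length := has a' List.mem_cons_self
    set dp₂ := (if σ = 0 then dp.insert (a', a') (pvCellBase l a')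
      else dp.insert (a', a' + σ) (pvCellStep l dp a' σ)) with hdp₂
    have hdp₂low : ∀ a₂ b₂ : Nat, a₂ ≤ b₂ → b₂ ≤ (pvOps l).length → b₂ - a₂ < σ →
        dp₂.getD (a₂, b₂) [] = pvPossA (pvSeg l a₂ b₂) := by
      intro a₂ b₂ h1 h2 h3
      by_cases hσ0 : σ = 0
      · omega
      · rw [hdp₂, if_neg hσ0, PySem.Dict.getD_insert,
          if_neg (by intro he; rw [Prod.mk.injEq] at he; omega)]
        exact Hlow a₂ b₂ h1 h2 h3
    have hdp₂self : dp₂.getD (a', a' + σ) [] = pvPossA (pvSeg l a' (a' + σ)) := by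
      by_cases hσ0 : σ = 0
      · subst hσ0
        rw [hdp₂]
        simp only [if_true, Nat.add_zero]
        rw [PySem.Dict.getD_insert, if_pos rfl]
        exact pvCellBase_correct l (by omega)
      · rw [hdp₂, if_neg hσ0, PySem.Dict.getD_insert, if_pos rfl]
        exact pvCellStep_correct l dp (Nat.pos_of_ne_zero hσ0) ham' Hlow
    apply ih dp₂ (fun x hx => has x (List.mem_cons_of_mem _ hx)) hdp₂low a b hab hbm
    rcases htar with h | ⟨hsp, h⟩
    · exact Or.inl h
    · right
      refine ⟨hsp, ?_⟩
      rcases h with h | h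
      · rcases List.mem_cons.mp h with h | h
        · subst h
          right
          have hb : b = a + σ := by omega
          rw [hb]
          exact hdp₂self
        · exact Or.inl h
      · right
        by_cases hk : ((a : Nat), (b : Nat)) = (a', a' + σ)
        · rw [Prod.mk.injEq] at hk
          rw [hk.1, hk.2]
          exact hdp₂self
        · by_cases hσ0 : σ = 0
          · subst hσ0
            rw [hdp₂]
            simp only [if_true]
            rw [PySem.Dict.getD_insert,
              if_neg (by simpa [Nat.add_zero] using hk)]
            exact h
          · rw [hdp₂, if_neg hσ0, PySem.Dict.getD_insert, if_neg hk]
            exact h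

lemma pvOuter (l : List Char) (σ : Nat) :
    σ ≤ (pvOps l).length + 1 →
    ∀ a b : Nat, a ≤ b → b ≤ (pvOps l).length → b - a < σ →
    ((List.range σ).foldl (fun dp span => pvInner l span dp)
        PySem.Dict.empty).getD (a, b) [] = pvPossA (pvSeg l a b) := by
  induction σ with
  | zero => intro _ a b _ _ h; omega
  | succ σ ih =>
    intro hσ a b hab hbm hspan
    rw [List.range_succ, List.foldl_append, List.foldl_cons, List.foldl_nil]
    unfold pvInner
    apply pvInner_fold l σ (List.range ((pvOps l).length + 1 - σ)) _
      (fun x hx => by rw [List.mem_range] at hx; omega)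
      (fun a' b' h1 h2 h3 => ih (by omega) a' b' h1 h2 h3)
      a b hab hbm
    by_cases hlt : b - a < σ
    · exact Or.inl hlt
    · exact Or.inr ⟨by omega, Or.inl (List.mem_range.mpr (by omega))⟩

lemma pvPossAlt_eq (l : List Char) : pvPossAlt l = pvPossA l := by
  have h := pvOuter l ((pvOps l).length + 1) (le_refl _) 0 (pvOps l).length
    (Nat.zero_le _) (le_refl _) (by omega)
  rw [pvPossAlt]
  simpa [pvSeg_full l] using h

lemma pvScore_fold (c : Int) (P : List Int) (ans : List Int) (acc : Int) :
    ans.foldl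
        (fun score a => if a = c then score + 5 else if a ∈ P then score + 2 else score)
        acc =
      acc + 5 * (ans.count c : Int)
        + 2 * ((ans.countP (fun x => decide (x ≠ c) && decide (x ∈ P))) : Int) := by
  induction ans generalizing acc with
  | nil => simp
  | cons h t ih =>
    by_cases h1 : h = c
    · simp [h1, ih]
      ring
    · by_cases h2 : h ∈ P
      · simp [h1, h2, ih]
        ring
      · simp [h1, h2, ih]

-- ===== VERDICT (by name: the statement is the Claim_ definition above) =====
theorem scoreOfStudents_spec : Claim_equal_scoreOfStudents := by
  intro s answers _
  simp only [Spec_scoreOfStudents, scoreOfStudents, scoreOfStudents_alt, pvPossAlt_eq,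
    pvScore_fold]
  ring
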